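/-
  THE CONTRACTS OF libc's HEAP SORT (c/libc.c; design/CONTRACTS.md entries 77, 80, 81; design/I6.md §6; DECISIONS D-6 / O-2):
  `swap_bytes`, `sift_down`, `qsort`. `Spec`s over the shadow layer only.

  WHAT IS PROMISED (D-6): safety and termination WHATEVER the comparison function returns, the footprint (only the array is
  written), no shadow byte written, and RECORD-PRESERVATION in the weak form — every output record equals SOME input record
  (`RecordsKept`). No sortedness, not even "a permutation".

      RecordsKept mem mem' base w n      every one of the `n` records of `w` bytes at `base` in `mem'` equals some record of `mem`
                                         (`refl`, `trans`, `of_eqOn`, `of_swap`, `of_swap_bytes`, `extend`, `extend_same`;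
                                         `toNat_record_addr`: the address `k * w + base` of a record, as a number)
      cmpSpec others frames w            THE CONTRACT OF A COMPARISON FUNCTION, as `qsort` needs it: called with two live records
                                         of `w` bytes it returns (with ANY eax), writes nothing but its own 48 bytes of stack, and
                                         writes no shadow byte
      CmpSpec Lay μ u₀ others frames cmp w
                                         the function at the address `cmp` satisfies it (`.calls : Calls … cmp (cmpSpec others
                                         frames w)`), and `cmp` is below 1 GB (`.lt`: stepping `call rax` needs a canonical target).
                                         THE PREMISE of the contracts of `sift_down` and `qsort` (farm/mkstatement.py: PREMISES);
                                         `CmpSpec.of_calls`: from the function's own contract (`uint32_compare`, `point_compare`)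

  THE INDIRECT CALL. `sift_down` spills `r8` (the comparison function) at `[rsp + 8]` of its own frame and calls it twice per
  round by `mov rax, [rsp + 8] ; call rax`. The entry address is a GHOST of the two Specs (`cmp : Word`; the pre says `r8 = cmp`,
  for `qsort`: `rcx = cmp`), and so is the record width `w` (the pre says `rcx = w`, for `qsort`: `rdx = w`), because the
  premise `CmpSpec … cmp w` is stated outside the Spec, about these two ghosts.

  THE INDIRECT CALL IN A PROOF (tested on the first round of `sift_down`, both calls: scratch/Sift2.lean):
    1. `intro Lay hLay μ hμ u₀ hcode hswap others frames cmp w hcmp u ret he hpre`, `v_entry he`, the pre opened (`hr8 : u.reg .r8 =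
       cmp` …), and `have hlt := hcmp.lt` BEFORE the walk: stepping `call rax` asks `side_canonical : cmp < 1073741824`.
    2. `u_walk hcode [hμ.vendor] until [L.sift_down.loop1, L.swap_bytes.entry] span [L.textLo, L.textHi] side (v_side)` stops
       after the `call rax` at `s_10133d` with `w_rip : s_10133d.rip = cmp` (RIP is not a literal; the load of `[rsp + 8]` was read
       through the store of r8 and rewritten by `hr8`).
    3. `u_call hcmp.calls at 0x10133d side (v_side)` (UserX/CallAt.lean) does there what `u_walk` does at a direct call: it leaves
       `call_inv` (`v_inv`), `pre_10133d`, and the goal at the returned state `s_10133dr` (`w_rip` = the literal 10133FH, `w_rsp`,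
       `w_kept`, `w_rbx` … `w_r15`, `w_same`, `w_code`, `w_inv`, `w_post`; the entry state's `w_mem_10133d`, `w_rsp_10133d` … stay).
    4. `pre_10133d`: `⟨⟨?_, hsh.offText⟩, hlive.sub _ _ ?_ ?_, hlive.sub _ _ ?_ ?_⟩`; the layer: `(hsh.inv.untouched hun).lower …`
       (`hun : ShadowUntouched u.mem s_10133d.mem := by v_untouched`, or from the loop invariant), `top' = rsp − 72`.
    5. at `s_10133dr`: `have w_eq := ProgX.Base.conv_code_eqOn w_code`; every stack slot the rest of the walk reads (`[rsp − 64]` = cmp,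
       the six saved registers, the return address) through the callee's footprint:
       `simp only [X86.User.Spec.footprint, vspec, w_rsp_10133d] at w_same` once, then `have … := by u_frame hslot` per slot;
       the array: `w_same.eqOn` / `RecordsKept.of_eqOn`. Then `u_walk` again. `swap_bytes` (a direct call): the cut point
       `L.swap_bytes.entry` stops the walk at its entry, `u_call (hswap others frames) at 0x10134c side (v_side)` applies it (so
       that the entry state's registers, which the post and the footprint are about, stay), `RecordsKept.of_swap_bytes`.
       (Rename `w_same`, `w_post` of one call before the next: the names are reused.)

      function     own frame                          callees (largest frame)                          frame
      swap_bytes   6 pushes + sub rsp 18H = 72        __asan_load1_noabort (16)               72 + 8 + 16 =  96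
      sift_down    6 pushes + sub rsp 18H = 72        swap_bytes (96), cmp (48)                   72 + 8 + 96 = 176
      qsort        5 pushes = 40                      sift_down (176), swap_bytes (96)           40 + 8 + 176 = 224

  THE CONTRACTS ARE THOSE OF THE SHARED PACKAGE (ProgX/Spec/LibcSort.lean, stated for any program record `T : ProgX.Text`, where each
  is described and `RecordsKept`'s lemmas are proved). The names of this file: `RecordsKept` and its lemmas are RE-EXPORTED (they do
  not depend on the program); `cmpSpec`, `CmpSpec`, `swap_bytes.spec`, `sift_down.spec`, `qsort.spec` are the generic ones at
  `ProgX.Base.T` (abbreviations: `hcmp.lt`, `hcmp.calls`, `⟨hlt, hcalls⟩` work on a `CmpSpec` as on the structure itself).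
-/
import ProgX.Base.Spec.Basic
import ProgX.Spec.LibcSort
namespace ProgX.Base.Spec
open X86 X86.User Asan

/-! ### Record-preservation -/

export ProgX.Spec (RecordsKept RecordsKept.refl RecordsKept.trans RecordsKept.toNat_byte RecordsKept.records_apart
  RecordsKept.of_eqOn RecordsKept.of_swap RecordsKept.word_add_ofNat RecordsKept.toNat_record_addr RecordsKept.of_swap_bytes
  RecordsKept.extend RecordsKept.extend_same)

/-! ### The comparison function -/

/-- **The contract of a comparison function** `cmp(rdi = p, rsi = q)`, as the heap sort needs it, for stb_vorbis: the generic
contract `ProgX.Spec.cmpSpec` (ProgX/Spec/LibcSort.lean, where it is described) at the text record `ProgX.Base.T`. -/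
abbrev cmpSpec (others : List Obj) (frames : List (Nat × FrameLayout)) (w : Nat) : Spec :=
  ProgX.Spec.cmpSpec T others frames w

/-- **`CmpSpec`: the function at the address `cmp` is a comparison function for records of `w` bytes** — the premise of the
contracts of `sift_down` and `qsort`: the generic structure `ProgX.Spec.CmpSpec` at `ProgX.Base.T`. `.lt`: the address is canonical
for the flat machine (below 1 GB); `.calls : Calls Lay μ WayInv (conv u₀) cmp (cmpSpec others frames w)`. -/
abbrev CmpSpec (Lay : Layout) (μ : Microarch) (u₀ : State) (others : List Obj) (frames : List (Nat × FrameLayout))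
    (cmp : Word) (w : Nat) : Prop :=
  ProgX.Spec.CmpSpec T Lay μ u₀ others frames cmp w

/-- **How a caller of `qsort` gets the premise**: from the contract `s` of the function it passes (`uint32_compare`,
`point_compare`: two live records of 4 bytes are what their pre asks for; their post says `ShadowUntouched`; 48 bytes of stack;
no window), and its address (a label: `hlt` is `by decide`). -/
theorem CmpSpec.of_calls {Lay : Layout} {μ : Microarch} {u₀ : State} {others : List Obj} {frames : List (Nat × FrameLayout)}
    {cmp : Word} {w : Nat} {s : Spec} (hlt : cmp < 0x40000000) (hc : Calls Lay μ ProgX.Base.WayInv (ProgX.Base.conv u₀) cmp s)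
    (hpre : ∀ u, (cmpSpec others frames w).pre u → s.pre u)
    (hpost : ∀ u v, (cmpSpec others frames w).pre u → s.post u v → ShadowUntouched u.mem v.mem)
    (hframe : s.frame ≤ 48) (hwrites : ∀ u, s.writes u = []) : CmpSpec Lay μ u₀ others frames cmp w :=
  ProgX.Spec.CmpSpec.of_calls (T := T) hlt hc hpre hpost hframe hwrites

/-! ### The three functions -/

/-- **`swap_bytes(rdi = a, rsi = b, rdx = w)`** (CONTRACTS 77), on the base image: the generic contract
`ProgX.Spec.swap_bytes.spec` (ProgX/Spec/LibcSort.lean, where it is described) at the text record `ProgX.Base.T`. -/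
abbrev swap_bytes.spec (others : List Obj) (frames : List (Nat × FrameLayout)) : Spec :=
  ProgX.Spec.swap_bytes.spec T others frames

/-- **`sift_down(rdi = base, rsi = root, rdx = end, rcx = w, r8 = cmp)`** (CONTRACTS 80), on the base image: the generic contract
`ProgX.Spec.sift_down.spec` (ProgX/Spec/LibcSort.lean, where it is described) at the text record `ProgX.Base.T`. -/
abbrev sift_down.spec (others : List Obj) (frames : List (Nat × FrameLayout)) (cmp : Word) (w : Nat) : Spec :=
  ProgX.Spec.sift_down.spec T others frames cmp w

/-- **`qsort(rdi = base, rsi = n, rdx = w, rcx = cmp)`** (CONTRACTS 81), on the base image: the generic contract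
`ProgX.Spec.qsort.spec` (ProgX/Spec/LibcSort.lean, where it is described) at the text record `ProgX.Base.T`. -/
abbrev qsort.spec (others : List Obj) (frames : List (Nat × FrameLayout)) (cmp : Word) (w : Nat) : Spec :=
  ProgX.Spec.qsort.spec T others frames cmp w

/-! The `vspec` rewrite rules (frame sizes, footprints) are the generic ones. -/
export ProgX.Spec (cmpSpec_frame cmpSpec_writes swap_bytes.spec_frame swap_bytes.spec_writes sift_down.spec_frame
  sift_down.spec_writes qsort.spec_frame qsort.spec_writes)

end ProgX.Base.Spec
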